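-- pv_equiv track=rewrite | github.com/Marlenqyzy/PP2 | week4/TSIS4/2pow.py | kru
-- ===== SOURCE A (Python) =====
-- def kru(str):
--     cnt = 0
--     for i in range(len(str)):
--         p = str[i]
--         if p.isalpha():
--             cnt += 1
--     i = 0
--     y = 0
--     while cnt >= y:
--         y = 2**i
--         if cnt == y:
--             return "H"
--             exit()
--         i += 1
--     return "C"
-- ===== SOURCE B (Python) =====
-- def kru(str):
--     cnt = sum(1 for p in str if p.isalpha())
--     return "H" if cnt > 0 and cnt & (cnt - 1) == 0 else "C"
-- ===== Notes on version B (the rewrite author's own statement) =====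
-- stated objective: simpler
-- what changed: Replaces the iterative search for a matching power of two (while-loop generating 2**i) with the constant-time closed-form bit test cnt > 0 and cnt & (cnt - 1) == 0.
import Mathlib
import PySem

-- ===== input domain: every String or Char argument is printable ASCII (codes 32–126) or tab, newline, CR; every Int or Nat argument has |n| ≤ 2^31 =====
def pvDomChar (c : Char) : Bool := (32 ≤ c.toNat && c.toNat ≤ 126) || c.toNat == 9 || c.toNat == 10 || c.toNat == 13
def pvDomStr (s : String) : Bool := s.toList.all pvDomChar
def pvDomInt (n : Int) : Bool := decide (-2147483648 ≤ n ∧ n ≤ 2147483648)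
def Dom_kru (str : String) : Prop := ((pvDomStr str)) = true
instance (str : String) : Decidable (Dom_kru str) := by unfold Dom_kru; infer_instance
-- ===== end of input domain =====

-- B replaces A's iterative power-of-two search loop with the closed-form bit test cnt > 0 && cnt &&& (cnt-1) == 0 (simpler).


-- ===== PORT A =====
-- for i in range(len(str)): p = str[i]; if p.isalpha(): cnt += 1   (sequential indexing = left fold over the chars)
def kruCount (l : List Char) : Nat :=
  l.foldl (fun cnt p => if PySem.Chars.isalpha p then cnt + 1 else cnt) 0

-- the 'while cnt >= y' loop; in Python it always terminates after at most cnt+2 iterations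
-- (2^i outgrows cnt), so the port carries that much fuel — the fuel branch is never reached.
def kruLoop (cnt : Nat) : Nat → Nat → Nat → String
  | 0, _, _ => "C"
  | fuel + 1, i, y =>
    if y ≤ cnt then
      let y' := 2 ^ i
      if cnt = y' then "H" else kruLoop cnt fuel (i + 1) y'
    else "C"

def kru (str : String) : String :=
  let cnt := kruCount str.toList
  kruLoop cnt (cnt + 2) 0 0

-- ===== PORT B =====
def kru_alt (str : String) : String :=
  let cnt := str.toList.countP (fun p => PySem.Chars.isalpha p)
  if 0 < cnt && cnt &&& (cnt - 1) == 0 then "H" else "C"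

-- ===== PRECONDITION & SPEC =====
def Spec_kru (str : String) (out : String) : Prop := out = kru_alt str
instance (str : String) (out : String) : Decidable (Spec_kru str out) := by unfold Spec_kru; infer_instance

-- ===== CLAIM (what is proved, stated in full; the proofs are below) =====
def Claim_equal_kru : Prop := ∀ (str : String), Dom_kru str → Spec_kru str (kru str)

-- ===== LEMMAS AND PROOFS =====

theorem kruCount_eq_countP (l : List Char) :
    kruCount l = l.countP (fun p => PySem.Chars.isalpha p) := by
  have h : ∀ (l : List Char) (n : Nat),
      l.foldl (fun cnt p => if PySem.Chars.isalpha p then cnt + 1 else cnt) n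
        = n + l.countP (fun p => PySem.Chars.isalpha p) := by
    intro l
    induction l with
    | nil => intro n; simp
    | cons a t ih =>
      intro n
      simp only [List.foldl, List.countP_cons]
      by_cases h : PySem.Chars.isalpha a = true
      · simp only [h, if_true, ih]; omega
      · simp only [h, ih]; simp
  simpa using h l 0

theorem land_pred_eq_zero_of_pow (k : Nat) : (2 ^ k) &&& (2 ^ k - 1) = 0 := by
  apply Nat.eq_of_testBit_eq
  intro i
  simp only [Nat.testBit_land, Nat.testBit_two_pow, Nat.testBit_two_pow_sub_one,
    Nat.zero_testBit, Bool.and_eq_false_iff]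
  by_cases h : k = i
  · right; simp [h]
  · left; simp [h]

theorem pow_of_land_pred_eq_zero :
    ∀ n, 0 < n → n &&& (n - 1) = 0 → ∃ k, n = 2 ^ k := by
  intro n
  induction n using Nat.strong_induction_on with
  | _ n ih =>
    intro hpos h
    rcases Nat.lt_or_ge n 2 with h2 | h2
    · exact ⟨0, by omega⟩
    · rcases Nat.even_or_odd n with he | ho
      · -- n even: n &&& (n-1) = 0 pushes down to n/2
        have hm : n / 2 &&& (n / 2 - 1) = 0 := by
          apply Nat.eq_of_testBit_eq
          intro j
          have hev : n % 2 = 0 := Nat.even_iff.mp he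
          have h1 : (n / 2 - 1) = (n - 1) / 2 := by omega
          have := congrArg (fun x => Nat.testBit x (j + 1)) h
          simp only [Nat.testBit_land, Nat.zero_testBit] at this ⊢
          rw [h1, Nat.testBit_div_two, Nat.testBit_div_two]
          exact this
        have hmpos : 0 < n / 2 := by omega
        obtain ⟨k, hk⟩ := ih (n / 2) (by omega) hmpos hm
        refine ⟨k + 1, ?_⟩
        have : n = 2 * (n / 2) := by
          rcases he with ⟨m, hm'⟩; omega
        rw [this, hk]; ring
      · -- n odd, n ≥ 2: contradiction, n/2 ≠ 0 yet all its bits vanish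
        exfalso
        have hd : (n - 1) / 2 = n / 2 := by
          rcases ho with ⟨m, hm'⟩; omega
        have hz : n / 2 = 0 := by
          apply Nat.eq_of_testBit_eq
          intro j
          have := congrArg (fun x => Nat.testBit x (j + 1)) h
          simp only [Nat.testBit_land, Nat.zero_testBit] at this ⊢
          rw [← Nat.testBit_div_two n j, ← Nat.testBit_div_two (n - 1) j, hd] at this
          simpa using this
        omega

theorem kruLoop_gt (cnt : Nat) : ∀ fuel i y, cnt < y → kruLoop cnt fuel i y = "C" := by
  intro fuel i y hy
  cases fuel with
  | zero => rfl
  | succ f => simp [kruLoop, Nat.not_le.mpr hy]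

theorem kruLoop_H_iff (cnt : Nat) :
    ∀ fuel i y, cnt + 2 ≤ i + fuel → y ≤ cnt →
      (kruLoop cnt fuel i y = "H" ↔ ∃ k, i ≤ k ∧ cnt = 2 ^ k) := by
  intro fuel
  induction fuel with
  | zero =>
    intro i y hb hy
    constructor
    · intro h; simp [kruLoop] at h
    · rintro ⟨k, hik, hk⟩
      exfalso
      have : cnt < 2 ^ k := by
        calc cnt < 2 ^ cnt := Nat.lt_two_pow_self
        _ ≤ 2 ^ k := Nat.pow_le_pow_right (by omega) (by omega)
      omega
  | succ f ih =>
    intro i y hb hy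
    simp only [kruLoop, hy, if_true]
    by_cases hc : cnt = 2 ^ i
    · rw [if_pos hc]
      exact ⟨fun _ => ⟨i, le_refl i, hc⟩, fun _ => rfl⟩
    · rw [if_neg hc]
      rcases Nat.lt_or_ge cnt (2 ^ i) with hlt | hge
      · rw [kruLoop_gt cnt f (i + 1) (2 ^ i) hlt]
        constructor
        · intro h; simp at h
        · rintro ⟨k, hik, hk⟩
          exfalso
          have : 2 ^ i ≤ 2 ^ k := Nat.pow_le_pow_right (by omega) hik
          omega
      · rw [ih (i + 1) (2 ^ i) (by omega) hge]
        constructor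
        · rintro ⟨k, hik, hk⟩; exact ⟨k, by omega, hk⟩
        · rintro ⟨k, hik, hk⟩
          refine ⟨k, ?_, hk⟩
          rcases Nat.eq_or_lt_of_le hik with rfl | h
          · exact absurd hk hc
          · omega

theorem kruLoop_mem (cnt : Nat) :
    ∀ fuel i y, kruLoop cnt fuel i y = "H" ∨ kruLoop cnt fuel i y = "C" := by
  intro fuel
  induction fuel with
  | zero => intro i y; right; rfl
  | succ f ih =>
    intro i y
    simp only [kruLoop]
    split
    · split
      · left; rfl
      · exact ih (i + 1) (2 ^ i)
    · right; rfl

-- ===== VERDICT (by name: the statement is the Claim_ definition above) =====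
theorem kru_spec : Claim_equal_kru := by
  intro str _
  unfold Spec_kru kru kru_alt
  rw [kruCount_eq_countP]
  set cnt := str.toList.countP (fun p => PySem.Chars.isalpha p) with hcnt
  have hH : kruLoop cnt (cnt + 2) 0 0 = "H" ↔ ∃ k, cnt = 2 ^ k := by
    rw [kruLoop_H_iff cnt (cnt + 2) 0 0 (by omega) (Nat.zero_le _)]
    exact ⟨fun ⟨k, _, hk⟩ => ⟨k, hk⟩, fun ⟨k, hk⟩ => ⟨k, Nat.zero_le k, hk⟩⟩
  by_cases h : ∃ k, cnt = 2 ^ k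
  · rw [hH.mpr h]
    obtain ⟨k, hk⟩ := h
    have h1 : 0 < cnt := by rw [hk]; exact Nat.two_pow_pos k
    have h2 : cnt &&& (cnt - 1) = 0 := by rw [hk]; exact land_pred_eq_zero_of_pow k
    simp [h1, h2]
  · have hC : kruLoop cnt (cnt + 2) 0 0 = "C" := by
      rcases kruLoop_mem cnt (cnt + 2) 0 0 with hh | hh
      · exact absurd (hH.mp hh) h
      · exact hh
    rw [hC]
    cases hcond : (decide (0 < cnt) && (cnt &&& (cnt - 1) == 0)) with
    | false => simp [hcond]
    | true =>
      exfalso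
      simp only [Bool.and_eq_true, decide_eq_true_eq, beq_iff_eq] at hcond
      exact h (pow_of_land_pred_eq_zero cnt hcond.1 hcond.2)
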